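-- pv_equiv track=rewrite | github.com/gh-wolistic/wolistic | backend/app/services/coins/service.py | _resolve_tier
-- ===== SOURCE A (Python) =====
-- _TIERS: list[tuple[str, int]] = [
--     ("Bronze", 0),
--     ("Silver", 500),
--     ("Gold", 2000),
--     ("Platinum", 5000),
-- ]
--
-- def _resolve_tier(lifetime_earned: int) -> tuple[str, str | None, int | None]:
--     """Return (current_tier_name, next_tier_name, coins_needed_for_next)."""
--     current_tier_name = _TIERS[0][0]
--     for name, threshold in _TIERS:
--         if lifetime_earned >= threshold:
--             current_tier_name = name
--
--     current_index = next(i for i, (name, _) in enumerate(_TIERS) if name == current_tier_name)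
--     if current_index + 1 < len(_TIERS):
--         next_name, next_threshold = _TIERS[current_index + 1]
--         return current_tier_name, next_name, next_threshold - lifetime_earned
--     return current_tier_name, None, None
-- ===== SOURCE B (Python) =====
-- _TIERS: list[tuple[str, int]] = [
--     ("Bronze", 0),
--     ("Silver", 500),
--     ("Gold", 2000),
--     ("Platinum", 5000),
-- ]
--
-- def _resolve_tier(lifetime_earned: int) -> tuple[str, str | None, int | None]:
--     """Return (current_tier_name, next_tier_name, coins_needed_for_next)."""
--     # tier index = number of non-zero thresholds reached (clamps at 0 by itself)
--     idx = (lifetime_earned >= 500) + (lifetime_earned >= 2000) + (lifetime_earned >= 5000)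
--     name = _TIERS[idx][0]
--     if idx + 1 < len(_TIERS):
--         next_name, next_threshold = _TIERS[idx + 1]
--         return name, next_name, next_threshold - lifetime_earned
--     return name, None, None
-- ===== Notes on version B (the rewrite author's own statement) =====
-- stated objective: simpler
-- what changed: B computes the tier index directly as the count of non-zero thresholds reached (sum of three comparisons) and indexes the table once, replacing A's scanning loop plus name-based index-recovery generator.
import Mathlib
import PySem

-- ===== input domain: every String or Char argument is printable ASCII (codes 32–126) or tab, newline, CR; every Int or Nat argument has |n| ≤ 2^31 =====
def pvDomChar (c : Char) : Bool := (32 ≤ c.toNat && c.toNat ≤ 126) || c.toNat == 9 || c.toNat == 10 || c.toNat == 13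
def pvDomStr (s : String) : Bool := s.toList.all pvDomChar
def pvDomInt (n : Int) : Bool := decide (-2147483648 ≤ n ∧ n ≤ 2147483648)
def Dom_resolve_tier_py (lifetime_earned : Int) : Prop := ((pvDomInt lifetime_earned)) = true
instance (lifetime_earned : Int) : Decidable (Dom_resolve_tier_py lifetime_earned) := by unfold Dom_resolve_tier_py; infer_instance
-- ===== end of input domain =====

-- B replaces A's two linear passes by a direct comparison-count index; simpler, same results.
-- ===== PORT A =====
def pvTiersA : List (String × Int) := [("Bronze", 0), ("Silver", 500), ("Gold", 2000), ("Platinum", 5000)]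

def resolve_tier_py (lifetime_earned : Int) : String × Option String × Option Int :=
  let current_tier_name :=
    pvTiersA.foldl (fun acc p => if lifetime_earned ≥ p.2 then p.1 else acc) (pvTiersA[0]!).1
  -- next(i for i, (name, _) in enumerate(_TIERS) if name == current_tier_name)
  match pvTiersA.zipIdx.find? (fun p => p.1.1 == current_tier_name) with
  | none => (current_tier_name, none, none)  -- unreachable (StopIteration): every name found is in the table
  | some (_, current_index) =>
    if current_index + 1 < pvTiersA.length then
      let p := pvTiersA[current_index + 1]!
      (current_tier_name, some p.1, some (p.2 - lifetime_earned))
    else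
      (current_tier_name, none, none)

-- ===== PORT B =====
def pvTiersB : List (String × Int) := [("Bronze", 0), ("Silver", 500), ("Gold", 2000), ("Platinum", 5000)]

def resolve_tier_py_alt (lifetime_earned : Int) : String × Option String × Option Int :=
  let idx : Nat := (if lifetime_earned ≥ 500 then 1 else 0)
    + (if lifetime_earned ≥ 2000 then 1 else 0) + (if lifetime_earned ≥ 5000 then 1 else 0)
  let name := (pvTiersB[idx]!).1
  if idx + 1 < pvTiersB.length then
    let p := pvTiersB[idx + 1]!
    (name, some p.1, some (p.2 - lifetime_earned))
  else
    (name, none, none)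

-- ===== PRECONDITION & SPEC =====
def Spec_resolve_tier_py (lifetime_earned : Int) (out : String × Option String × Option Int) : Prop := out = resolve_tier_py_alt lifetime_earned
instance (lifetime_earned : Int) (out : String × Option String × Option Int) : Decidable (Spec_resolve_tier_py lifetime_earned out) := by unfold Spec_resolve_tier_py; infer_instance

-- ===== CLAIM (what is proved, stated in full; the proofs are below) =====
def Claim_equal_resolve_tier_py : Prop := ∀ (lifetime_earned : Int), Dom_resolve_tier_py lifetime_earned → Spec_resolve_tier_py lifetime_earned (resolve_tier_py lifetime_earned)

-- ===== LEMMAS AND PROOFS =====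

-- ===== VERDICT (by name: the statement is the Claim_ definition above) =====
theorem resolve_tier_py_spec : Claim_equal_resolve_tier_py := by
  intro x _
  unfold Spec_resolve_tier_py resolve_tier_py resolve_tier_py_alt pvTiersA pvTiersB
  by_cases h1 : x ≥ 500 <;> by_cases h2 : x ≥ 2000 <;> by_cases h3 : x ≥ 5000 <;>
    simp [List.foldl, List.zipIdx, List.find?, h1, h2, h3] <;> omega
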